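-- pv_equiv track=rewrite | github.com/osherdp/python-training | solutions_python_book/log_puzzle/logPuzzle.py | organized_url_lst
-- ===== SOURCE A (Python) =====
-- def organized_url_lst(lst_url, urls_file_name):
--     """
--     Sorting the url list according to the photo name, filtering the repeating urls.
--     The sorting way woult be accordong to the urls_file_name -  "logo_data.cyber.org.il" or "message_data.cyber.org.il".
--     :param lst_url: The url list that needs to be sorted.
--     :param urls_file_name: "logo_data.cyber.org.il" or "message_data.cyber.org.il".
--     if "logo_data.cyber.org.il" the sorting way is according the photo name, regular sorting.
--     if "message_data.cyber.org.il" the sorting way is according the second part of the photo name.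
--     example - photo_name = "a-bbbb-cccc.jpg",  the urls would be sorted according to the -"cccc" part.
--     :return:
--     """
--     # Making dictionary - {photo_name: url}
--     dict_name_vs_url = {}
--
--     for url in lst_url:
--         photo_name = finding_photo_name(url)
--         if photo_name not in dict_name_vs_url:
--             dict_name_vs_url[photo_name] = url
--
--     # The photo name would be sorted according to the urls_file_name.
--     lst_name_sorted = []
--     if urls_file_name == r"logo_data.cyber.org.il":
--         lst_name_sorted = sorted(dict_name_vs_url.keys())
--     if urls_file_name == "message_data.cyber.org.il":
--         lst_name_sorted = sorted(dict_name_vs_url.keys(), key=lambda s: s[7:])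
--
--     sorted_url_lst = []
--     for name in lst_name_sorted:
--         sorted_url_lst.append(dict_name_vs_url[name])
--     return sorted_url_lst
--
-- def finding_photo_name(url):
--     """
--     Finding the photo name substring in the url string.
--     :param url: url string. in this format:  r"http://data.cyber.org.il/python/logpuzzle/photo_name.jpg"
--     :return: The photo name
--     """
--     index_start_file_name = -1
--     while url[index_start_file_name] != r'/':
--         index_start_file_name -= 1
--     file_name = url[index_start_file_name + 1:]
--     return file_name
-- ===== SOURCE B (Python) =====
-- def finding_photo_name(url):
--     """Backward scan for the last '/'; IndexError when the url has none (same as A)."""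
--     index_start_file_name = -1
--     while url[index_start_file_name] != r'/':
--         index_start_file_name -= 1
--     file_name = url[index_start_file_name + 1:]
--     return file_name
--
--
-- def organized_url_lst(lst_url, urls_file_name):
--     # Extract every photo name once, up front.
--     names = [finding_photo_name(url) for url in lst_url]
--     # Pick the sort key from the file name; anything else yields an empty list.
--     if urls_file_name == r"logo_data.cyber.org.il":
--         key = lambda p: p[0]
--     elif urls_file_name == "message_data.cyber.org.il":
--         key = lambda p: p[0][7:]
--     else:
--         return []
--     # Stable sort of the (name, url) pairs, then one forward pass keeping the
--     # first url of each photo name (stability keeps first-seen order on ties).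
--     result = []
--     seen = set()
--     for name, url in sorted(zip(names, lst_url), key=key):
--         if name not in seen:
--             seen.add(name)
--             result.append(url)
--     return result
-- ===== Notes on version B (the rewrite author's own statement) =====
-- stated objective: alternative
-- what changed: Instead of building a name->url dict, sorting its keys and looking each key back up, B sorts the url list itself by the photo-name key (stable) and makes one forward pass keeping the first url of each photo name with a seen-set.
import Mathlib
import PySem

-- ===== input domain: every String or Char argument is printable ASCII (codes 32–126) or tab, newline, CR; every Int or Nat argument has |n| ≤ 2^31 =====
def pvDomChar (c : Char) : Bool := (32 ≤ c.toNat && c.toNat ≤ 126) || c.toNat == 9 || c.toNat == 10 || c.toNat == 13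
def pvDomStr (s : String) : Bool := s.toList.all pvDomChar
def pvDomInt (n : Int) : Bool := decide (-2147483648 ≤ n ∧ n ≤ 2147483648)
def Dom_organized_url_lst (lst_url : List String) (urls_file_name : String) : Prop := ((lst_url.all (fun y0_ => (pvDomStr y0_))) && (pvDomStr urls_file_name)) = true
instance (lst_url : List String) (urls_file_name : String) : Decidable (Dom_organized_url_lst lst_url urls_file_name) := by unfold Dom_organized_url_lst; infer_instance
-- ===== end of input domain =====

-- B replaces A's dict-of-names pipeline (build name→url dict, sort its keys, look each key
-- back up) by a stable sort of the url list itself followed by one forward dedup pass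
-- (alternative decomposition; same behaviour, proof below).

-- ===== PORT A =====

-- finding_photo_name: backward scan from index -1 for '/'; fuel len+1 covers every index
-- Python visits; none = IndexError (url without '/'), excluded by Pre_.
def fpnGo (url : String) (i : Int) : Nat → Option Int
  | 0 => none
  | fuel + 1 =>
    match PySem.Str.pyGet? url i with
    | none => none
    | some c => if c = '/' then some i else fpnGo url (i - 1) fuel

def finding_photo_name (url : String) : Option String :=
  match fpnGo url (-1) (url.toList.length + 1) with
  | some i => some (PySem.Str.slice url (some (i + 1)) none)   -- url[i+1:]
  | none => none

-- totalized photo name: "" stands for the IndexError case, which Pre_ excludes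
def pvName (url : String) : String := (finding_photo_name url).getD ""

def organized_url_lst (lst_url : List String) (urls_file_name : String) : List String :=
  let dict_name_vs_url : PySem.Dict String String :=
    lst_url.foldl (fun d url =>
      if d.contains (pvName url) then d else d.insert (pvName url) url) PySem.Dict.empty
  let lst_name_sorted : List String := []
  let lst_name_sorted := if urls_file_name = "logo_data.cyber.org.il"
    then PySem.List.sorted dict_name_vs_url.keys (fun s => s) false else lst_name_sorted
  let lst_name_sorted := if urls_file_name = "message_data.cyber.org.il"
    then PySem.List.sorted dict_name_vs_url.keys (fun s => PySem.Str.slice s (some 7) none) false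
    else lst_name_sorted
  -- dict_name_vs_url[name]: the key is always present, so getD's default is never read
  lst_name_sorted.foldl (fun acc name => acc ++ [dict_name_vs_url.getD name ""]) []

-- ===== PORT B =====

-- forward pass over (name, url) pairs: keep each url whose photo name was not seen yet
def pvDedupByName (ps : List (String × String)) : List String :=
  (ps.foldl (fun (st : PySem.Set String × List String) p =>
      if p.1 ∈ st.1 then st else (PySem.Set.add st.1 p.1, st.2 ++ [p.2]))
    (PySem.Set.empty, [])).2

def organized_url_lst_alt (lst_url : List String) (urls_file_name : String) : List String :=
  let names := lst_url.map (fun url => pvName url)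
  if urls_file_name = "logo_data.cyber.org.il" then
    pvDedupByName (PySem.List.sorted (names.zip lst_url) (fun p => p.1) false)
  else if urls_file_name = "message_data.cyber.org.il" then
    pvDedupByName (PySem.List.sorted (names.zip lst_url) (fun p => PySem.Str.slice p.1 (some 7) none) false)
  else []

-- ===== PRECONDITION & SPEC =====
-- Pre_: every url contains '/' — exactly where A's backward scan (and B's, same helper)
-- terminates instead of raising IndexError.
def Pre_organized_url_lst (lst_url : List String) (urls_file_name : String) : Prop :=
  ∀ url ∈ lst_url, PySem.Str.isIn "/" url = true

instance (lst_url : List String) (urls_file_name : String) : Decidable (Pre_organized_url_lst lst_url urls_file_name) := by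
  unfold Pre_organized_url_lst; infer_instance

def pvWitness_organized_url_lst : List String × String :=
  (["http://data.cyber.org.il/a-b.jpg", "http://data.cyber.org.il/a-b.jpg"], "logo_data.cyber.org.il")

def Spec_organized_url_lst (lst_url : List String) (urls_file_name : String) (out : List String) : Prop := out = organized_url_lst_alt lst_url urls_file_name
instance (lst_url : List String) (urls_file_name : String) (out : List String) : Decidable (Spec_organized_url_lst lst_url urls_file_name out) := by unfold Spec_organized_url_lst; infer_instance

-- ===== CLAIM (what is proved, stated in full; the proofs are below) =====
def Claim_equal_organized_url_lst : Prop := ∀ (lst_url : List String) (urls_file_name : String), Dom_organized_url_lst lst_url urls_file_name → Pre_organized_url_lst lst_url urls_file_name → Spec_organized_url_lst lst_url urls_file_name (organized_url_lst lst_url urls_file_name)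

-- ===== LEMMAS AND PROOFS =====

-- dedup-by-first-photo-name with an explicit seen list (proof-side model of B's pass)
def dgo (seen : List String) : List String → List String
  | [] => []
  | u :: us => if pvName u ∈ seen then dgo seen us else u :: dgo (pvName u :: seen) us

theorem dgo_congr_seen (s1 s2 : List String) (L : List String)
    (h : ∀ y, y ∈ s1 ↔ y ∈ s2) : dgo s1 L = dgo s2 L := by
  induction L generalizing s1 s2 with
  | nil => rfl
  | cons u us ih =>
    simp only [dgo]
    by_cases hm : pvName u ∈ s1
    · rw [if_pos hm, if_pos ((h _).1 hm), ih _ _ h]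
    · rw [if_neg hm, if_neg (fun c => hm ((h _).2 c))]
      refine congrArg _ (ih _ _ ?_)
      intro y; simp only [List.mem_cons]; exact or_congr Iff.rfl (h y)

theorem dedup_fold_eq (us : List String) (s : PySem.Set String) (acc : List String)
    (seen : List String) (h : ∀ y, y ∈ s ↔ y ∈ seen) :
    ((us.map (fun u => (pvName u, u))).foldl (fun (st : PySem.Set String × List String) p =>
      if p.1 ∈ st.1 then st else (PySem.Set.add st.1 p.1, st.2 ++ [p.2])) (s, acc)).2
    = acc ++ dgo seen us := by
  induction us generalizing s acc seen with
  | nil => simp [dgo]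
  | cons u us ih =>
    simp only [List.map_cons, List.foldl_cons, dgo]
    by_cases hm : pvName u ∈ seen
    · rw [if_pos ((h _).2 hm), if_pos hm]
      exact ih s acc seen h
    · rw [if_neg (fun c => hm ((h _).1 c)), if_neg hm]
      rw [ih (PySem.Set.add s (pvName u)) (acc ++ [u]) (pvName u :: seen) ?_]
      · simp
      · intro y
        rw [PySem.Set.mem_add, List.mem_cons]
        exact Iff.trans (or_congr (h y) Iff.rfl) or_comm

theorem dgo_append (s : List String) (A B : List String) :
    dgo s (A ++ B) = dgo s A ++ dgo ((dgo s A).map pvName ++ s) B := by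
  induction A generalizing s with
  | nil => simp [dgo]
  | cons u A ih =>
    simp only [List.cons_append, dgo]
    by_cases hm : pvName u ∈ s
    · rw [if_pos hm, if_pos hm, ih]
    · rw [if_neg hm, if_neg hm, ih]
      simp only [List.cons_append, List.map_cons]
      refine congrArg _ (congrArg _ ?_)
      refine dgo_congr_seen _ _ _ ?_
      intro y; simp only [List.mem_append, List.mem_cons]; tauto

theorem dgo_sublist (s : List String) (L : List String) : (dgo s L).Sublist L := by
  induction L generalizing s with
  | nil => exact List.Sublist.refl _
  | cons u us ih =>
    simp only [dgo]
    by_cases hm : pvName u ∈ s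
    · rw [if_pos hm]; exact (ih s).cons u
    · rw [if_neg hm]; exact (ih _).cons₂ u

theorem mem_names_dgo (s : List String) (L : List String) (y : String) :
    y ∈ (dgo s L).map pvName ↔ y ∈ L.map pvName ∧ y ∉ s := by
  induction L generalizing s with
  | nil => simp [dgo]
  | cons u us ih =>
    simp only [dgo, List.map_cons, List.mem_cons]
    by_cases hm : pvName u ∈ s
    · rw [if_pos hm, ih]
      constructor
      · rintro ⟨h1, h2⟩; exact ⟨Or.inr h1, h2⟩
      · rintro ⟨h1 | h1, h2⟩
        · exact absurd (h1 ▸ hm) h2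
        · exact ⟨h1, h2⟩
    · rw [if_neg hm]
      simp only [List.map_cons, List.mem_cons, ih, List.mem_cons]
      constructor
      · rintro (rfl | ⟨h1, h2⟩)
        · exact ⟨Or.inl rfl, hm⟩
        · exact ⟨Or.inr h1, fun c => h2 (Or.inr c)⟩
      · rintro ⟨rfl | h1, h2⟩
        · exact Or.inl rfl
        · by_cases hy : y = pvName u
          · exact Or.inl hy
          · exact Or.inr ⟨h1, fun c => (c.elim hy h2)⟩

theorem names_dgo_nodup (s : List String) (L : List String) :
    ((dgo s L).map pvName).Nodup := by
  induction L generalizing s with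
  | nil => simp [dgo]
  | cons u us ih =>
    simp only [dgo]
    by_cases hm : pvName u ∈ s
    · rw [if_pos hm]; exact ih s
    · rw [if_neg hm]
      simp only [List.map_cons, List.nodup_cons]
      refine ⟨fun c => ?_, ih _⟩
      exact ((mem_names_dgo _ _ _).1 c).2 (List.mem_cons_self)

theorem dgo_skip (s : List String) (P Q : List String) (x : String)
    (h : pvName x ∈ s ∨ pvName x ∈ P.map pvName) :
    dgo s (P ++ x :: Q) = dgo s (P ++ Q) := by
  induction P generalizing s with
  | nil =>
    simp only [List.nil_append, dgo]
    rcases h with h | h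
    · rw [if_pos h]
    · simp at h
  | cons u P ih =>
    simp only [List.cons_append, dgo]
    by_cases hm : pvName u ∈ s
    · rw [if_pos hm, if_pos hm]
      refine ih _ ?_
      rcases h with h | h
      · exact Or.inl h
      · simp only [List.map_cons, List.mem_cons] at h
        rcases h with h | h
        · exact Or.inl (h ▸ hm)
        · exact Or.inr h
    · rw [if_neg hm, if_neg hm]
      refine congrArg _ (ih _ ?_)
      rcases h with h | h
      · exact Or.inl (List.mem_cons_of_mem _ h)
      · simp only [List.map_cons, List.mem_cons] at h
        rcases h with h | h
        · exact Or.inl (h ▸ List.mem_cons_self)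
        · exact Or.inr h

theorem dgo_seen_cons_irrelevant (m : String) (s : List String) (Q : List String)
    (h : ∀ u ∈ Q, pvName u ≠ m) : dgo (m :: s) Q = dgo s Q := by
  induction Q generalizing s with
  | nil => rfl
  | cons u us ih =>
    simp only [dgo]
    have hne : pvName u ≠ m := h u List.mem_cons_self
    by_cases hm : pvName u ∈ s
    · rw [if_pos (List.mem_cons_of_mem _ hm), if_pos hm]
      exact ih s fun v hv => h v (List.mem_cons_of_mem _ hv)
    · rw [if_neg (fun c => (List.mem_cons.1 c).elim hne hm), if_neg hm]
      rw [dgo_congr_seen (pvName u :: m :: s) (m :: pvName u :: s) _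
        (by intro y; simp only [List.mem_cons]; tauto)]
      exact congrArg _ (ih _ fun v hv => h v (List.mem_cons_of_mem _ hv))

theorem insertBy_middle {α : Type} (b : α → α → Bool) (x : α) (A B : List α)
    (hA : ∀ a ∈ A, b x a = false) (hB : ∀ c ∈ B, b x c = true) :
    PySem.List.insertBy b x (A ++ B) = A ++ x :: B := by
  induction A with
  | nil =>
    cases B with
    | nil => rfl
    | cons c B => simp [PySem.List.insertBy, hB c List.mem_cons_self]
  | cons a A ih =>
    simp only [List.cons_append, PySem.List.insertBy, hA a List.mem_cons_self]
    simp only [Bool.false_eq_true, if_false, List.cons.injEq, true_and]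
    exact ih (fun a' ha' => hA a' (List.mem_cons_of_mem _ ha'))

theorem insertBy_take_drop {α : Type} (b : α → α → Bool) (x : α) (M : List α) :
    PySem.List.insertBy b x M
      = M.takeWhile (fun y => !(b x y)) ++ x :: M.dropWhile (fun y => !(b x y)) := by
  induction M with
  | nil => rfl
  | cons y M ih =>
    cases hby : b x y with
    | true => simp [PySem.List.insertBy, hby]
    | false => simp [PySem.List.insertBy, hby, ih]

theorem dict_items_eq (xs : List String) (d : PySem.Dict String String) (seen : List String)
    (h : ∀ y, d.contains y = true ↔ y ∈ seen) :
    (xs.foldl (fun d url =>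
      if d.contains (pvName url) then d else d.insert (pvName url) url) d).items
    = d.items ++ (dgo seen xs).map (fun u => (pvName u, u)) := by
  induction xs generalizing d seen with
  | nil => simp [dgo]
  | cons u xs ih =>
    simp only [List.foldl_cons, dgo]
    cases hc : d.contains (pvName u) with
    | true =>
      rw [if_pos rfl, if_pos ((h _).1 hc), ih d seen h]
    | false =>
      have hns : pvName u ∉ seen := fun c => by rw [(h _).2 c] at hc; exact Bool.true_eq_false.mp hc
      rw [if_neg (by decide), if_neg hns]
      rw [ih (d.insert (pvName u) u) (pvName u :: seen) ?_]
      · rw [PySem.Dict.items_insert_of_not_contains d u hc]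
        simp
      · intro y
        rw [PySem.Dict.contains_insert, List.mem_cons]
        constructor
        · intro hy
          rcases Bool.or_eq_true_iff.1 hy with hy | hy
          · exact Or.inl (by exact_mod_cast (beq_iff_eq.1 hy))
          · exact Or.inr ((h _).1 hy)
        · rintro (rfl | hy)
          · simp
          · simp [(h _).2 hy]

theorem map_insertBy {α β κ : Type} [LT κ] [DecidableLT κ] (h : α → β) (key : β → κ)
    (x : α) (M : List α) :
    PySem.List.insertBy (fun a b => decide (key a < key b)) (h x) (M.map h)
    = (PySem.List.insertBy (fun a b => decide (key (h a) < key (h b))) x M).map h := by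
  induction M with
  | nil => rfl
  | cons m M ih =>
    simp only [List.map_cons, PySem.List.insertBy]
    by_cases hb : key (h x) < key (h m)
    · rw [if_pos (decide_eq_true hb), if_pos (decide_eq_true hb)]
      rfl
    · rw [if_neg (by simpa using hb), if_neg (by simpa using hb)]
      simp only [List.map_cons]
      rw [ih]

theorem sorted_map {α β κ : Type} [LT κ] [DecidableLT κ] (h : α → β) (key : β → κ)
    (L : List α) :
    PySem.List.sorted (L.map h) key false
    = (PySem.List.sorted L (fun u => key (h u)) false).map h := by
  rw [PySem.List.sorted_eq_foldl_insertBy, PySem.List.sorted_eq_foldl_insertBy]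
  have aux : ∀ (L : List α) (acc : List α),
      (L.map h).foldl
        (fun acc x => PySem.List.insertBy (fun a b => decide (key a < key b)) x acc) (acc.map h)
      = (L.foldl (fun acc x =>
          PySem.List.insertBy (fun a b => decide (key (h a) < key (h b))) x acc) acc).map h := by
    intro L
    induction L with
    | nil => intro acc; rfl
    | cons u L ih =>
      intro acc
      simp only [List.map_cons, List.foldl_cons]
      rw [map_insertBy h key u acc, ih]
  simpa using aux L []

theorem dropWhile_lt (k : String → String) (x : String) (M : List String)
    (hM : M.Pairwise (fun a b => k (pvName a) ≤ k (pvName b))) :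
    ∀ q ∈ M.dropWhile (fun y => !(decide (k (pvName x) < k (pvName y)))),
      k (pvName x) < k (pvName q) := by
  induction M with
  | nil => simp
  | cons y M ih =>
    rcases List.pairwise_cons.1 hM with ⟨hy, hM'⟩
    cases hb : decide (k (pvName x) < k (pvName y)) with
    | false =>
      simp only [List.dropWhile_cons, hb, Bool.not_false, if_true]
      exact ih hM'
    | true =>
      simp only [List.dropWhile_cons, hb, Bool.not_true]
      intro q hq
      rcases List.mem_cons.1 hq with rfl | hq
      · exact of_decide_eq_true hb
      · exact lt_of_lt_of_le (of_decide_eq_true hb) (hy q hq)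

-- the crux: dedup-first commutes with the stable sort when the sort key factors
-- through the photo name
theorem dedup_sorted_comm (k : String → String) (xs : List String) :
    dgo [] (PySem.List.sorted xs (fun u => k (pvName u)) false)
    = PySem.List.sorted (dgo [] xs) (fun u => k (pvName u)) false := by
  induction xs using List.reverseRecOn with
  | nil => rfl
  | append_singleton xs x ih =>
    have hsortapp : ∀ (L : List String),
        PySem.List.sorted (L ++ [x]) (fun u => k (pvName u)) false
        = PySem.List.insertBy (fun a b => decide (k (pvName a) < k (pvName b))) x
            (PySem.List.sorted L (fun u => k (pvName u)) false) := by
      intro L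
      rw [PySem.List.sorted_eq_foldl_insertBy, PySem.List.sorted_eq_foldl_insertBy,
        List.foldl_append, List.foldl_cons, List.foldl_nil]
    have hpw : (PySem.List.sorted xs (fun u => k (pvName u)) false).Pairwise
        (fun a b => k (pvName a) ≤ k (pvName b)) :=
      PySem.List.sorted_pairwise xs (fun u => k (pvName u))
    set S := PySem.List.sorted xs (fun u => k (pvName u)) false with hSdef
    set p := fun y => !(decide (k (pvName x) < k (pvName y))) with hpdef
    have hdecomp := insertBy_take_drop (fun a b => decide (k (pvName a) < k (pvName b))) x S
    set P := S.takeWhile p with hPdef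
    set Q := S.dropWhile p with hQdef
    have hPQ : P ++ Q = S := List.takeWhile_append_dropWhile
    have hP : ∀ a ∈ P, ¬ k (pvName x) < k (pvName a) := by
      intro a ha
      have := List.mem_takeWhile_imp ha
      simpa [hpdef] using this
    have hQ : ∀ q ∈ Q, k (pvName x) < k (pvName q) := dropWhile_lt k x S hpw
    have hmemS : ∀ y, y ∈ S ↔ y ∈ xs := fun y => PySem.List.mem_sorted _ _ _ y
    have hnamesS : ∀ y, y ∈ S.map pvName ↔ y ∈ xs.map pvName := by
      intro y
      simp only [List.mem_map]
      exact exists_congr fun u => and_congr_left fun _ => hmemS u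
    have hdgoapp : dgo [] (xs ++ [x])
        = if pvName x ∈ xs.map pvName then dgo [] xs else dgo [] xs ++ [x] := by
      rw [dgo_append]
      have hseen : pvName x ∈ (dgo [] xs).map pvName ++ ([] : List String)
          ↔ pvName x ∈ xs.map pvName := by
        rw [List.append_nil, mem_names_dgo]
        simp
      by_cases hx : pvName x ∈ xs.map pvName
      · rw [if_pos hx]
        simp only [dgo, if_pos (hseen.mpr hx)]
        simp
      · rw [if_neg hx]
        simp only [dgo, if_neg (fun c => hx (hseen.mp c))]
    rw [hsortapp xs, ← hSdef, hdecomp, hdgoapp]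
    by_cases hx : pvName x ∈ xs.map pvName
    · -- a url with this photo name was already present: the new one is dropped
      rw [if_pos hx, ← ih]
      have hxP : pvName x ∈ P.map pvName := by
        obtain ⟨y, hy, hyx⟩ := List.mem_map.mp hx
        have hyS : y ∈ P ++ Q := by rw [hPQ]; exact (hmemS y).mpr hy
        rcases List.mem_append.mp hyS with h | h
        · exact List.mem_map.mpr ⟨y, h, hyx⟩
        · exact absurd (hQ y h) (by rw [hyx]; exact lt_irrefl _)
      rw [dgo_skip [] P Q x (Or.inr hxP), hPQ]
    · -- fresh photo name: x survives the pass, exactly where insertBy put it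
      rw [if_neg hx, hsortapp (dgo [] xs), ← ih]
      have hsubP : ∀ u ∈ dgo [] P, u ∈ P := fun u hu => (dgo_sublist [] P).subset hu
      have hfreshS : ∀ u ∈ S, pvName u ≠ pvName x := by
        intro u hu hc
        exact hx ((hnamesS _).mp (hc ▸ List.mem_map_of_mem hu))
      have hxseen : pvName x ∉ (dgo [] P).map pvName ++ ([] : List String) := by
        rw [List.append_nil]
        intro hmem
        obtain ⟨u, hu, hux⟩ := List.mem_map.mp hmem
        exact hfreshS u (by rw [← hPQ]; exact List.mem_append.mpr (Or.inl (hsubP u hu))) hux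
      have hLHS : dgo [] (P ++ x :: Q)
          = dgo [] P ++ x :: dgo ((dgo [] P).map pvName ++ []) Q := by
        rw [dgo_append]
        refine congrArg _ ?_
        simp only [dgo]
        rw [if_neg hxseen]
        refine congrArg _ ?_
        exact dgo_seen_cons_irrelevant _ _ _
          (fun u hu => hfreshS u (by rw [← hPQ]; exact List.mem_append.mpr (Or.inr hu)))
      have hSsplit : dgo [] S = dgo [] P ++ dgo ((dgo [] P).map pvName ++ []) Q := by
        rw [← hPQ, dgo_append]
      rw [hLHS, hSsplit]
      refine (insertBy_middle _ x _ _ ?_ ?_).symm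
      · intro a ha
        exact decide_eq_false (hP a (hsubP a ha))
      · intro c hc
        exact decide_eq_true (hQ c ((dgo_sublist _ Q).subset hc))

-- A's branch output equals B's branch output, for any key on names
theorem branch_eq (k : String → String) (xs : List String) :
    (PySem.List.sorted
        ((xs.foldl (fun d url =>
          if d.contains (pvName url) then d else d.insert (pvName url) url)
          PySem.Dict.empty).keys) k false).foldl
      (fun acc name => acc ++ [(xs.foldl (fun d url =>
          if d.contains (pvName url) then d else d.insert (pvName url) url)
          PySem.Dict.empty).getD name ""]) []
    = pvDedupByName (PySem.List.sorted ((xs.map (fun url => pvName url)).zip xs) (fun p => k p.1) false) := by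
  have hzip : (xs.map (fun url => pvName url)).zip xs = xs.map (fun u => (pvName u, u)) := by
    have := (List.zip_map' (f := fun u => pvName u) (g := fun u : String => u) (l := xs)).symm
    simpa using this.symm
  have hitems : (xs.foldl (fun d url =>
      if d.contains (pvName url) then d else d.insert (pvName url) url)
      PySem.Dict.empty).items = (dgo [] xs).map (fun u => (pvName u, u)) := by
    have h0 : ∀ y : String, (PySem.Dict.empty : PySem.Dict String String).contains y = true ↔ y ∈ ([] : List String) := by
      intro y; simp [PySem.Dict.contains_empty]
    simpa using dict_items_eq xs PySem.Dict.empty [] h0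
  have hkeys : (xs.foldl (fun d url =>
      if d.contains (pvName url) then d else d.insert (pvName url) url)
      PySem.Dict.empty).keys = (dgo [] xs).map pvName := by
    simp only [PySem.Dict.keys, hitems, List.map_map]
    rfl
  have hnodup : (xs.foldl (fun d url =>
      if d.contains (pvName url) then d else d.insert (pvName url) url)
      PySem.Dict.empty).keys.Nodup := by
    rw [hkeys]; exact names_dgo_nodup [] xs
  have hget : ∀ u ∈ dgo [] xs, (xs.foldl (fun d url =>
      if d.contains (pvName url) then d else d.insert (pvName url) url)
      PySem.Dict.empty).getD (pvName u) "" = u := by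
    intro u hu
    exact PySem.Dict.getD_of_mem_items _ (by rw [hitems]; exact List.mem_map_of_mem hu) hnodup ""
  have hB : pvDedupByName (PySem.List.sorted ((xs.map (fun url => pvName url)).zip xs) (fun p => k p.1) false)
      = dgo [] (PySem.List.sorted xs (fun u => k (pvName u)) false) := by
    rw [hzip, sorted_map (fun u => (pvName u, u)) (fun p => k p.1) xs]
    unfold pvDedupByName
    have h0 : ∀ y : String, y ∈ (PySem.Set.empty : PySem.Set String) ↔ y ∈ ([] : List String) := by
      intro y; rfl
    simpa using dedup_fold_eq (PySem.List.sorted xs (fun u => k (pvName u)) false)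
      PySem.Set.empty [] [] h0
  rw [PySem.List.foldl_append_singleton_eq_map, hkeys,
    sorted_map (pvName : String → String) k (dgo [] xs),
    List.map_map, hB, dedup_sorted_comm k xs, List.nil_append]
  refine Eq.trans (List.map_congr_left ?_) (List.map_id _)
  intro u hu
  exact hget u ((PySem.List.mem_sorted _ _ _ _).1 hu)

-- ===== VERDICT (by name: the statement is the Claim_ definition above) =====
theorem organized_url_lst_spec : Claim_equal_organized_url_lst := by
  intro lst_url urls_file_name _ _
  unfold Spec_organized_url_lst organized_url_lst organized_url_lst_alt
  by_cases h1 : urls_file_name = "logo_data.cyber.org.il"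
  · simp only [h1, if_neg (by decide : ("logo_data.cyber.org.il" : String) ≠ "message_data.cyber.org.il")]
    exact branch_eq (fun s => s) lst_url
  · by_cases h2 : urls_file_name = "message_data.cyber.org.il"
    · simp only [h2]
      exact branch_eq (fun s => PySem.Str.slice s (some 7) none) lst_url
    · simp only [if_neg h1, if_neg h2]
      rfl
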